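-- pv_equiv track=rewrite | github.com/andretdias/Introduction_to_Computer_Science_Course | Unit 3 Structured Types/6. Dictionaries/Exercises/biggest.py | biggest
-- ===== SOURCE A (Python) =====
-- def biggest(aDict):
--     '''
--     aDict: A dictionary, where all the values are lists.
--
--     returns: The key with the largest number of values associated with it
--     '''
--     length = []
--     for element in aDict.values():
--         length.append(len(element))
--     maxlength = max(length)
--     for element in aDict.keys():
--         if len(aDict[element]) == maxlength:
--             biggest = element
--     return biggest
-- ===== SOURCE B (Python) =====
-- def biggest(aDict):
--     return max(reversed(aDict), key=lambda k: len(aDict[k]))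
-- ===== Notes on version B (the rewrite author's own statement) =====
-- stated objective: idiomatic
-- what changed: Replaces the auxiliary length list plus the second overwriting scan with a single argmax over the keys in reverse order (max keeps the first maximum, so reversing reproduces A's last-tie choice).
-- outside the precondition, e.g. on biggest({}): A raises ValueError, B raises ValueError
import Mathlib
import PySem

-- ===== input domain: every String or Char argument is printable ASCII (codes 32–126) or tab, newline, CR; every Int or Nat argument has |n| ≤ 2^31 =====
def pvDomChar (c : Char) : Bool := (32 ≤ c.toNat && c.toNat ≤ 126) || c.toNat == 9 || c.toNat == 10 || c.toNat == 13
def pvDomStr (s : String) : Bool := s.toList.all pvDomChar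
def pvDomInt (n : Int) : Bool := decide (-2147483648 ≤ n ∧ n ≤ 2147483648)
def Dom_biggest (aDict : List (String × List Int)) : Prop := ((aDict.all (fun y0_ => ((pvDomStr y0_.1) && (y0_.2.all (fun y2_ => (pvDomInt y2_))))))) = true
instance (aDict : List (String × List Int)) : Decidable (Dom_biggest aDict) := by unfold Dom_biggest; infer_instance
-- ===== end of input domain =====

-- Idiomatic rewrite: B replaces A's length list + second overwriting scan with one
-- argmax over the keys in reverse order (max keeps the first maximum, so reversing
-- reproduces A's last-tie choice). Equivalence is about the return value.


-- ===== PORT A =====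
-- aDict[element] (present key, first match)
def pvLookup (aDict : List (String × List Int)) (k : String) : List Int :=
  ((PySem.Dict.mk aDict).get? k).getD []

def biggest (aDict : List (String × List Int)) : String :=
  -- length = []; for element in aDict.values(): length.append(len(element))
  let length : List Int := aDict.foldl (fun acc p => acc ++ [(p.2.length : Int)]) []
  -- maxlength = max(length)  (ValueError on empty dict: excluded by Pre_)
  match PySem.List.max? length (fun x => x) with
  | none => ""
  | some maxlength =>
    -- for element in aDict.keys(): if len(aDict[element]) == maxlength: biggest = element
    let acc : Option String := (aDict.map Prod.fst).foldl
      (fun b k => if ((pvLookup aDict k).length : Int) = maxlength then some k else b) none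
    -- 'biggest' is always assigned under Pre_; .getD "" is unreachable there
    acc.getD ""

-- ===== PORT B =====
-- return max(reversed(aDict), key=lambda k: len(aDict[k]))
def biggest_alt (aDict : List (String × List Int)) : String :=
  match PySem.List.max? (aDict.map Prod.fst).reverse
      (fun k => ((pvLookup aDict k).length : Int)) with
  | none => ""   -- empty dict: max() raises ValueError, excluded by Pre_
  | some k => k

-- ===== PRECONDITION & SPEC =====
-- Pre_ excludes the empty dict (max([]) raises ValueError in both A and B) and lists whose
-- keys repeat (a Python dict has unique keys, so such lists represent no Python input).
def Pre_biggest (aDict : List (String × List Int)) : Prop :=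
  aDict ≠ [] ∧ (aDict.map Prod.fst).Nodup
instance (aDict : List (String × List Int)) : Decidable (Pre_biggest aDict) := by
  unfold Pre_biggest; infer_instance

def pvWitness_biggest : (List (String × List Int)) := [("a", [1, 2]), ("b", [3])]

def Spec_biggest (aDict : List (String × List Int)) (out : String) : Prop := out = biggest_alt aDict
instance (aDict : List (String × List Int)) (out : String) : Decidable (Spec_biggest aDict out) := by unfold Spec_biggest; infer_instance

-- ===== CLAIM (what is proved, stated in full; the proofs are below) =====
def Claim_equal_biggest : Prop := ∀ (aDict : List (String × List Int)), Dom_biggest aDict → Pre_biggest aDict → Spec_biggest aDict (biggest aDict)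

-- ===== LEMMAS AND PROOFS =====

-- first fold step of max? on a two-headed list
theorem pvMax_cons2 (key : String → Int) (a c : String) (t : List String) :
    PySem.List.max? (a :: c :: t) key
      = PySem.List.max? ((if key a < key c then c else a) :: t) key := by
  by_cases h : key a < key c <;> simp [PySem.List.max?, h]

-- a head that dominates the tail is the maximum
theorem pvMax_top (key : String → Int) (l : List String) :
    ∀ a : String, (∀ y ∈ l, key y ≤ key a) →
    PySem.List.max? (a :: l) key = some a := by
  induction l with
  | nil => intro a _; simp [PySem.List.max?]
  | cons c t ih =>
      intro a h
      have hc : ¬ key a < key c := not_lt.mpr (h c (by simp))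
      rw [pvMax_cons2, if_neg hc]
      exact ih a (fun y hy => h y (by simp [hy]))

-- a head strictly dominated by some tail element is irrelevant
theorem pvMax_drop (key : String → Int) (l : List String) :
    ∀ a : String, (∃ y ∈ l, key a < key y) →
    PySem.List.max? (a :: l) key = PySem.List.max? l key := by
  induction l with
  | nil => intro a hex; simp at hex
  | cons c t ih =>
      intro a hex
      by_cases hc : key a < key c
      · rw [pvMax_cons2, if_pos hc]
      · rw [pvMax_cons2, if_neg hc]
        obtain ⟨y, hy, hay⟩ := hex
        have hyt : y ∈ t := by
          rcases List.mem_cons.mp hy with h | h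
          · exact absurd (h ▸ hay) hc
          · exact h
        rw [ih a ⟨y, hyt, hay⟩, ih c ⟨y, hyt, lt_of_le_of_lt (le_of_not_gt hc) hay⟩]

-- A's overwriting scan = max? of the reversed list (last key achieving the maximum m)
theorem pvMain (key : String → Int) (m : Int) (ks : List String)
    (hub : ∀ k ∈ ks, key k ≤ m) (hex : ∃ k ∈ ks, key k = m) :
    ks.foldl (fun b k => if key k = m then some k else b) none
      = PySem.List.max? ks.reverse key := by
  induction ks using List.reverseRecOn with
  | nil => simp at hex
  | append_singleton ys a ih =>
      rw [List.foldl_append]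
      simp only [List.foldl_cons, List.foldl_nil, List.reverse_append, List.reverse_cons,
        List.reverse_nil, List.nil_append, List.cons_append]
      have ha : key a ≤ m := hub a (by simp)
      by_cases hka : key a = m
      · rw [if_pos hka]
        exact (pvMax_top key ys.reverse a (fun y hy =>
          (hub y (by simp [List.mem_reverse.mp hy])).trans hka.ge)).symm
      · rw [if_neg hka]
        obtain ⟨k, hk, hkm⟩ := hex
        have hkys : k ∈ ys := by
          rcases List.mem_append.mp hk with h | h
          · exact h
          · simp at h; exact absurd (h ▸ hkm) hka
        have hgt : key a < key k := hkm ▸ lt_of_le_of_ne ha hka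
        rw [pvMax_drop key ys.reverse a ⟨k, List.mem_reverse.mpr hkys, hgt⟩]
        exact ih (fun k hk => hub k (by simp [hk])) ⟨k, hkys, hkm⟩

-- under Nodup keys, the dict lookup of a member pair's key is its own value
theorem pvLookup_mem (aDict : List (String × List Int)) (p : String × List Int)
    (hnd : (aDict.map Prod.fst).Nodup) (hp : p ∈ aDict) :
    pvLookup aDict p.1 = p.2 := by
  induction aDict with
  | nil => simp at hp
  | cons q t ih =>
      obtain ⟨kq, vq⟩ := q
      simp only [List.map_cons, List.nodup_cons] at hnd
      rcases List.mem_cons.mp hp with h | h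
      · subst h
        simp [pvLookup, PySem.Dict.get?_mk_cons]
      · have hne : kq ≠ p.1 := by
          intro he
          exact hnd.1 (he ▸ List.mem_map.mpr ⟨p, h, rfl⟩)
        have hstep : pvLookup ((kq, vq) :: t) p.1 = pvLookup t p.1 := by
          simp [pvLookup, PySem.Dict.get?_mk_cons, hne]
        rw [hstep]
        exact ih hnd.2 h

-- ===== VERDICT (by name: the statement is the Claim_ definition above) =====
theorem biggest_spec : Claim_equal_biggest := by
  intro aDict _ hpre
  obtain ⟨hne, hnd⟩ := hpre
  unfold Spec_biggest biggest biggest_alt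
  set key : String → Int := fun k => ((pvLookup aDict k).length : Int) with hkey
  -- the length list is the map of value lengths
  rw [PySem.List.foldl_append_singleton_eq_map (fun p => ((p.2.length : Int)) ) aDict []]
  simp only [List.nil_append]
  -- the length list is nonempty, so max? is some
  obtain ⟨m, hm⟩ : ∃ m, PySem.List.max? (aDict.map fun p => ((p.2.length : Int))) (fun x => x) = some m := by
    cases h : PySem.List.max? (aDict.map fun p => ((p.2.length : Int))) (fun x => x) with
    | none =>
        exact absurd (List.map_eq_nil_iff.mp ((PySem.List.max?_eq_none_iff _ _).mp h)) hne
    | some m => exact ⟨m, rfl⟩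
  rw [hm]
  simp only []
  -- facts about m
  have hmem := PySem.List.max?_mem hm
  have hmax := PySem.List.max?_isMax hm
  obtain ⟨p0, hp0, hp0m⟩ := List.mem_map.mp hmem
  -- A's second loop, rewritten over keys with the key function
  have hfold :
      (aDict.map Prod.fst).foldl
        (fun b k => if ((pvLookup aDict k).length : Int) = m then some k else b) none
        = PySem.List.max? (aDict.map Prod.fst).reverse key := by
    apply pvMain key m
    · intro k hk
      obtain ⟨p, hp, rfl⟩ := List.mem_map.mp hk
      have := pvLookup_mem aDict p hnd hp
      simpa [hkey, this] using hmax _ (List.mem_map.mpr ⟨p, hp, rfl⟩)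
    · refine ⟨p0.1, List.mem_map.mpr ⟨p0, hp0, rfl⟩, ?_⟩
      simpa [hkey, pvLookup_mem aDict p0 hnd hp0] using hp0m
  simp only [hfold]
  cases h : PySem.List.max? (aDict.map Prod.fst).reverse key with
  | none =>
      have := (PySem.List.max?_eq_none_iff _ _).mp h
      simp only [List.reverse_eq_nil_iff, List.map_eq_nil_iff] at this
      exact absurd this hne
  | some k => rfl
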